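-- pv_equiv track=rewrite | github.com/keithhetrick/music-advisor | shared/ma_utils/philosophy_services.py | inject_philosophy_line_into_client
-- ===== SOURCE A (Python) =====
-- from typing import Any, Dict, List, Tuple
--
-- def inject_philosophy_line_into_client(text: str, philosophy_line: str) -> str:
--     """Insert philosophy line into client rich text if not already present."""
--     if "PHILOSOPHY:" in text:
--         return text
--     lines = text.splitlines()
--     out: List[str] = []
--     inserted = False
--     for l in lines:
--         out.append(l)
--         if l.startswith("# HCI_V1_SUMMARY") and not inserted:
--             out.append("")
--             out.append(philosophy_line)
--             out.append("")
--             out.append("")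
--             inserted = True
--     if not inserted:
--         out = [philosophy_line, "", "", *out]
--     return "\n".join(out).rstrip() + "\n"
-- ===== SOURCE B (Python) =====
-- def inject_philosophy_line_into_client(text: str, philosophy_line: str) -> str:
--     """Insert philosophy line into client rich text if not already present."""
--     if "PHILOSOPHY:" in text:
--         return text
--     # work on the whole normalized string, not on a list of lines:
--     # a line starts with the header iff "\n# HCI_V1_SUMMARY" occurs in "\n" + norm
--     norm = "\n".join(text.splitlines())
--     q = ("\n" + norm).find("\n# HCI_V1_SUMMARY")
--     if q < 0:
--         res = philosophy_line + "\n\n\n" + norm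
--     else:
--         e = norm.find("\n", q)          # end of the matched line
--         if e < 0:
--             e = len(norm)
--         res = norm[:e] + "\n\n" + philosophy_line + "\n\n" + norm[e:]
--     return res.rstrip() + "\n"
-- ===== Notes on version B (the rewrite author's own statement) =====
-- stated objective: alternative
-- what changed: B never builds an output list of lines: it joins once into a normalized string and then works purely at string level, locating the header line via a substring search for "\n# HCI_V1_SUMMARY" in "\n"+norm and splicing the philosophy block into the string at the end of that line (or prepending it), instead of A's per-line loop with an inserted flag.
import Mathlib
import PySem

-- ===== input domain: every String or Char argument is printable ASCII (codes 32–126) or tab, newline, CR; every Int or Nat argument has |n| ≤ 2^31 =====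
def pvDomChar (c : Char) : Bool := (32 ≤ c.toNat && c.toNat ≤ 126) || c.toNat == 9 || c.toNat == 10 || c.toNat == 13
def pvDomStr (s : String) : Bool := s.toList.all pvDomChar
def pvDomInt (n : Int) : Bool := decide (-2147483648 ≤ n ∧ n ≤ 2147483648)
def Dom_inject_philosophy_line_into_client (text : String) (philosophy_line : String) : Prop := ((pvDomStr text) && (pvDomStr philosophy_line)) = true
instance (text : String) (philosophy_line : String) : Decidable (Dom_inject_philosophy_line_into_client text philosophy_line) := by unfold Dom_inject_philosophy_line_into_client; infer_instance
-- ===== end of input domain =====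

-- B works at string level: one substring search locates the header line in the
-- joined text and the philosophy block is spliced in by string slicing; objective: alternative.


-- ===== PORT A =====
-- body of A's for-loop (out.append(l); conditional 4-line insert), used by the foldl below
def pvStepA (phil : String) (st : List String × Bool) (l : String) : List String × Bool :=
  let out := st.1 ++ [l]
  if PySem.Str.startswith l "# HCI_V1_SUMMARY" && !st.2 then (out ++ ["", phil, "", ""], true)
  else (out, st.2)

def inject_philosophy_line_into_client (text : String) (philosophy_line : String) : String :=
  if PySem.Str.isIn "PHILOSOPHY:" text then text
  else
    let lines := PySem.Str.splitlines text
    -- for l in lines: out.append(l); if l.startswith(...) and not inserted: append four lines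
    let st := lines.foldl (pvStepA philosophy_line) ([], false)
    let out := if !st.2 then philosophy_line :: "" :: "" :: st.1 else st.1
    PySem.Str.rstrip (PySem.Str.join "\n" out) ++ "\n"

-- ===== PORT B =====
def inject_philosophy_line_into_client_alt (text : String) (philosophy_line : String) : String :=
  if PySem.Str.isIn "PHILOSOPHY:" text then text
  else
    let norm := PySem.Str.join "\n" (PySem.Str.splitlines text)
    -- q = ("\n" + norm).find("\n# HCI_V1_SUMMARY")
    let q := PySem.Str.find ("\n" ++ norm) "\n# HCI_V1_SUMMARY"
    let res :=
      if q < 0 then philosophy_line ++ "\n\n\n" ++ norm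
      else
        -- e = norm.find("\n", q); if e < 0: e = len(norm)
        let e0 := PySem.Str.findFrom norm "\n" q none
        let e := if e0 < 0 then PySem.Str.len norm else e0
        PySem.Str.slice norm none (some e) ++ "\n\n" ++ philosophy_line ++ "\n\n" ++
          PySem.Str.slice norm (some e) none
    PySem.Str.rstrip res ++ "\n"

-- ===== PRECONDITION & SPEC =====
def Spec_inject_philosophy_line_into_client (text : String) (philosophy_line : String) (out : String) : Prop := out = inject_philosophy_line_into_client_alt text philosophy_line
instance (text : String) (philosophy_line : String) (out : String) : Decidable (Spec_inject_philosophy_line_into_client text philosophy_line out) := by unfold Spec_inject_philosophy_line_into_client; infer_instance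

-- ===== CLAIM (what is proved, stated in full; the proofs are below) =====
def Claim_equal_inject_philosophy_line_into_client : Prop := ∀ (text : String) (philosophy_line : String), Dom_inject_philosophy_line_into_client text philosophy_line → Spec_inject_philosophy_line_into_client text philosophy_line (inject_philosophy_line_into_client text philosophy_line)

-- ===== LEMMAS AND PROOFS =====

def pvJ (L : List (List Char)) : List Char := PySem.Chars.join ['\n'] L
def pvSumlen (L : List (List Char)) (i : Nat) : Nat := ((L.take i).map List.length).sum + i

theorem pvJoin_cons (l : List Char) (L : List (List Char)) :
    pvJ (l :: L) = l ++ (if L = [] then [] else '\n' :: pvJ L) := by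
  cases L with
  | nil => simp [pvJ, PySem.Chars.join, List.intercalate]
  | cons a t => simp [pvJ, PySem.Chars.join, List.intercalate, List.intersperse]

theorem pvSumlen_cons_succ (l : List Char) (L : List (List Char)) (n : Nat) :
    pvSumlen (l :: L) (n + 1) = l.length + 1 + pvSumlen L n := by
  unfold pvSumlen; rw [List.take_succ_cons]; simp; omega

theorem pvPrefix_append_iff (pref l t : List Char) (hpn : '\n' ∉ pref) (hl : '\n' ∉ l)
    (ht : t = [] ∨ ∃ t', t = '\n' :: t') : pref <+: l ++ t ↔ pref <+: l := by
  constructor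
  · intro h
    rcases ht with rfl | ⟨t', rfl⟩
    · simpa using h
    · by_cases hlen : pref.length ≤ l.length
      · have he := List.prefix_iff_eq_take.mp h
        rw [List.take_append_of_le_length hlen] at he
        exact List.prefix_iff_eq_take.mpr he
      · exfalso
        have hlt : l.length < pref.length := by omega
        have hg := List.IsPrefix.getElem h (i := l.length) hlt
        have hr : (l ++ '\n' :: t')[l.length]'(by simp) = '\n' := by
          simp [List.getElem_append_right (Nat.le_refl l.length)]
        exact hpn ((hg.trans hr) ▸ List.getElem_mem hlt)
  · intro h; exact h.trans (List.prefix_append l t)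

theorem pvOcc (pref : List Char) (hp : pref ≠ []) (hpn : '\n' ∉ pref) :
    ∀ (L : List (List Char)), (∀ l ∈ L, '\n' ∉ l) → ∀ q : Nat,
      (('\n' :: pref) <+: (('\n' :: pvJ L).drop q) ↔
        ∃ i, ∃ h : i < L.length, q = pvSumlen L i ∧ pref <+: L[i]) := by
  intro L
  induction L with
  | nil =>
    intro _ q
    constructor
    · intro h
      exfalso
      cases q with
      | zero =>
        simp only [List.drop_zero] at h
        have : pvJ [] = [] := by simp [pvJ, PySem.Chars.join, List.intercalate]
        rw [this] at h
        rcases List.cons_prefix_cons.mp h with ⟨-, h2⟩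
        exact hp (List.prefix_nil.mp h2)
      | succ n =>
        have : pvJ [] = [] := by simp [pvJ, PySem.Chars.join, List.intercalate]
        rw [this] at h
        simp [List.drop_succ_cons] at h
    · rintro ⟨i, hi, -⟩; simp at hi
  | cons l L' ih =>
    intro hL q
    have hln : '\n' ∉ l := hL l (by simp)
    have hL' : ∀ m ∈ L', '\n' ∉ m := fun m hm => hL m (by simp [hm])
    rw [pvJoin_cons]
    cases q with
    | zero =>
      simp only [List.drop_zero]
      rw [List.cons_prefix_cons]
      have hrest : (if L' = [] then ([] : List Char) else '\n' :: pvJ L') = [] ∨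
          ∃ t', (if L' = [] then ([] : List Char) else '\n' :: pvJ L') = '\n' :: t' := by
        by_cases hL0 : L' = [] <;> simp [hL0]
      rw [pvPrefix_append_iff pref l _ hpn hln hrest]
      constructor
      · rintro ⟨-, h⟩
        exact ⟨0, by simp, by simp [pvSumlen], by simpa using h⟩
      · rintro ⟨i, hi, hq, hpre⟩
        cases i with
        | zero => exact ⟨rfl, by simpa using hpre⟩
        | succ n => rw [pvSumlen_cons_succ] at hq; omega
    | succ q' =>
      rw [List.drop_succ_cons]
      by_cases hq : q' < l.length
      · constructor
        · intro h
          exfalso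
          have hdrop : (l ++ if L' = [] then [] else '\n' :: pvJ L').drop q' =
              l.drop q' ++ (if L' = [] then [] else '\n' :: pvJ L') := by
            rw [List.drop_append_of_le_length (by omega)]
          rw [hdrop] at h
          have h0 := List.IsPrefix.getElem h (i := 0) (by simp)
          have hg : (l.drop q' ++ (if L' = [] then [] else '\n' :: pvJ L'))[0]'(by simp; omega) = l[q'] := by
            rw [List.getElem_append_left (by simp; omega)]
            simp [List.getElem_drop]
          have h1 : '\n' = l[q'] := by simpa using h0.trans hg
          exact hln (by rw [h1]; exact List.getElem_mem hq)
        · rintro ⟨i, hi, hq2, -⟩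
          exfalso
          cases i with
          | zero => simp [pvSumlen] at hq2
          | succ n =>
            rw [pvSumlen_cons_succ] at hq2
            have : pvSumlen L' n ≥ 0 := Nat.zero_le _
            omega
      · have hdrop : (l ++ if L' = [] then [] else '\n' :: pvJ L').drop q' =
            (if L' = [] then [] else '\n' :: pvJ L').drop (q' - l.length) := by
          rw [List.drop_append]
          rw [List.drop_of_length_le (by omega)]
          simp
        rw [hdrop]
        by_cases hL0 : L' = []
        · subst hL0
          simp only [if_pos rfl]
          constructor
          · intro h; simp at h
          · rintro ⟨i, hi, hq2, -⟩
            cases i with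
            | zero => simp [pvSumlen] at hq2
            | succ n => simp at hi
        · rw [if_neg hL0]
          rw [ih hL' (q' - l.length)]
          constructor
          · rintro ⟨i, hi, hq2, hpre⟩
            refine ⟨i + 1, by simpa using hi, ?_, by simpa using hpre⟩
            rw [pvSumlen_cons_succ]; omega
          · rintro ⟨i, hi, hq2, hpre⟩
            cases i with
            | zero => simp [pvSumlen] at hq2
            | succ n =>
              rw [pvSumlen_cons_succ] at hq2
              exact ⟨n, by simpa using hi, by omega, by simpa using hpre⟩


theorem pvSumlen_succ (L : List (List Char)) (i : Nat) (h : i < L.length) :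
    pvSumlen L (i + 1) = pvSumlen L i + L[i].length + 1 := by
  unfold pvSumlen
  rw [List.take_add_one, List.getElem?_eq_getElem h]
  rw [List.map_append, List.sum_append]
  simp; omega

theorem pvSumlen_mono (L : List (List Char)) (i j : Nat) (hij : i < j) (hj : j ≤ L.length) :
    pvSumlen L i < pvSumlen L j := by
  induction j with
  | zero => omega
  | succ k ih =>
    rw [pvSumlen_succ L k (by omega)]
    rcases Nat.lt_or_ge i k with hk | hk
    · have := ih hk (by omega); omega
    · have : i = k := by omega
      subst this; omega

theorem pvFind_nl_none (l : List Char) (h : '\n' ∉ l) :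
    PySem.Chars.find l ['\n'] = -1 := by
  rw [PySem.Chars.find_eq_neg_one_iff _ _, List.singleton_infix_iff]
  exact h

theorem pvFind_nl_append (l t : List Char) (h : '\n' ∉ l) :
    PySem.Chars.find (l ++ '\n' :: t) ['\n'] = (l.length : Int) := by
  have hinf : ['\n'] <:+: l ++ '\n' :: t := (List.singleton_infix_iff _ _).mpr (by simp)
  have hnn : 0 ≤ PySem.Chars.find (l ++ '\n' :: t) ['\n'] :=
    (PySem.Chars.find_nonneg_iff _ _).mpr hinf
  obtain ⟨hpre, hmin⟩ := PySem.Chars.find_spec hnn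
  set F := (PySem.Chars.find (l ++ '\n' :: t) ['\n']).toNat with hF
  have hle : F ≤ l.length := by
    by_contra hgt
    exact hmin l.length (by omega) (by rw [List.drop_left]; simp)
  have hge : ¬ F < l.length := by
    intro hlt
    have h0 := List.IsPrefix.getElem hpre (i := 0) (by simp)
    have hd : ((l ++ '\n' :: t).drop F)[0]'(by simp; omega) = l[F] := by
      rw [List.getElem_drop]
      exact List.getElem_append_left (by omega)
    have h1 : '\n' = l[F] := by simpa using h0.trans hd
    exact h (by rw [h1]; exact List.getElem_mem hlt)
  have : F = l.length := by omega
  omega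

theorem pvFind_probe (pref : List Char) (hp : pref ≠ []) (hpn : '\n' ∉ pref)
    (L : List (List Char)) (hL : ∀ l ∈ L, '\n' ∉ l) :
    PySem.Chars.find ('\n' :: pvJ L) ('\n' :: pref) =
      (match L.findIdx? (fun l => decide (pref <+: l)) with
       | none => (-1 : Int)
       | some i => ((pvSumlen L i : Nat) : Int)) := by
  cases hf : L.findIdx? (fun l => decide (pref <+: l)) with
  | none =>
    rw [List.findIdx?_eq_none_iff] at hf
    simp only []
    rw [PySem.Chars.find_eq_neg_one_iff]
    intro hinf
    obtain ⟨j, hj⟩ := (PySem.Chars.exists_prefix_drop_iff_isIn _ _).mpr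
      ((PySem.Chars.isIn_iff_infix _ _).mpr hinf)
    obtain ⟨i, hi, -, hpre⟩ := (pvOcc pref hp hpn L hL j).mp hj
    have := hf L[i] (List.getElem_mem hi)
    simp at this
    exact this hpre
  | some i0 =>
    obtain ⟨hi0, hp0, hmin0⟩ := List.findIdx?_eq_some_iff_getElem.mp hf
    simp only [decide_eq_true_eq] at hp0
    have hocc0 : ('\n' :: pref) <+: (('\n' :: pvJ L).drop (pvSumlen L i0)) :=
      (pvOcc pref hp hpn L hL _).mpr ⟨i0, hi0, rfl, hp0⟩
    have hinf : ('\n' :: pref) <:+: ('\n' :: pvJ L) :=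
      (PySem.Chars.isIn_iff_infix _ _).mp
        ((PySem.Chars.exists_prefix_drop_iff_isIn _ _).mp ⟨_, hocc0⟩)
    have hnn : 0 ≤ PySem.Chars.find ('\n' :: pvJ L) ('\n' :: pref) :=
      (PySem.Chars.find_nonneg_iff _ _).mpr hinf
    obtain ⟨hpre, hmin⟩ := PySem.Chars.find_spec hnn
    obtain ⟨i, hi, hFq, hpi⟩ := (pvOcc pref hp hpn L hL _).mp hpre
    have hii : ¬ i < i0 := by
      intro hlt
      have := hmin0 i hlt
      simp at this
      exact this hpi
    have hieq : i = i0 := by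
      by_contra hne
      have hlt : i0 < i := by omega
      have hsl := pvSumlen_mono L i0 i hlt (by omega)
      exact hmin (pvSumlen L i0) (by omega) hocc0
    subst hieq
    simp only []
    omega

theorem pvJoin_append (xs ys : List (List Char)) (h : xs ≠ []) :
    pvJ (xs ++ ys) = pvJ xs ++ (if ys = [] then [] else '\n' :: pvJ ys) := by
  induction xs with
  | nil => simp at h
  | cons a t ih =>
    cases t with
    | nil => simp [pvJoin_cons]
    | cons b u =>
      rw [List.cons_append, pvJoin_cons, pvJoin_cons (L := b :: u), ih (by simp)]
      simp [List.append_assoc]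

theorem pvJoin_length (L : List (List Char)) (h : L ≠ []) :
    (pvJ L).length = (L.map List.length).sum + L.length - 1 := by
  induction L with
  | nil => simp at h
  | cons a t ih =>
    rw [pvJoin_cons]
    cases t with
    | nil => simp
    | cons b u =>
      rw [if_neg (by simp)]
      have h2 := ih (by simp)
      simp only [List.length_append, List.length_cons, h2, List.map_cons, List.sum_cons]
      have : (pvJ (b :: u)).length = b.length + ((List.map List.length u).sum + u.length + 1) - 1 := by
        rw [h2]; simp; omega
      simp [this]; omega

theorem pvDrop_sumlen (L : List (List Char)) (i : Nat) (h : i < L.length) :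
    (pvJ L).drop (pvSumlen L i) = pvJ (L.drop i) := by
  induction L generalizing i with
  | nil => simp at h
  | cons a t ih =>
    cases i with
    | zero => simp [pvSumlen]
    | succ n =>
      have ht : t ≠ [] := by intro e; subst e; simp at h
      rw [pvJoin_cons, if_neg ht]
      have hs : pvSumlen (a :: t) (n + 1) = a.length + 1 + pvSumlen t n := by
        unfold pvSumlen; rw [List.take_succ_cons]; simp; omega
      rw [hs]
      have : a.length + 1 + pvSumlen t n = a.length + (1 + pvSumlen t n) := by omega
      rw [this]
      have hd : (a ++ '\n' :: pvJ t).drop (a.length + (1 + pvSumlen t n)) =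
          ('\n' :: pvJ t).drop (1 + pvSumlen t n) := by
        simp [List.drop_append]
      rw [hd]
      have hd2 : ('\n' :: pvJ t).drop (1 + pvSumlen t n) = (pvJ t).drop (pvSumlen t n) := by
        rw [Nat.add_comm, List.drop_succ_cons]
      rw [hd2, ih n (by simpa using h), List.drop_succ_cons]

theorem pvRstrip_nl (s : List Char) :
    PySem.Chars.rstrip (s ++ ['\n']) = PySem.Chars.rstrip s := by
  simp [PySem.Chars.rstrip, PySem.Chars.isspace]

theorem pvGo_no_nl (isB : Char → Bool) (h10 : isB '\n' = true) :
    ∀ s cur acc, (∀ l ∈ acc, '\n' ∉ l) → ('\n' ∉ cur) →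
    ∀ l ∈ PySem.Chars.splitlines.go isB s cur acc, '\n' ∉ l := by
  intro s cur acc
  induction s, cur, acc using PySem.Chars.splitlines.go.induct isB with
  | case1 cur acc he =>
    intro hacc hcur l hl
    rw [PySem.Chars.splitlines.go, if_pos he] at hl
    exact hacc l (List.mem_reverse.mp hl)
  | case2 cur acc he =>
    intro hacc hcur l hl
    rw [PySem.Chars.splitlines.go, if_neg he] at hl
    rcases List.mem_cons.mp (List.mem_reverse.mp hl) with h | h
    · subst h; simpa using hcur
    · exact hacc l h
  | case3 rest cur acc ih =>
    intro hacc hcur l hl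
    rw [PySem.Chars.splitlines.go] at hl
    refine ih ?_ (by simp) l hl
    intro m hm
    rcases List.mem_cons.mp hm with h | h
    · subst h; simpa using hcur
    · exact hacc m h
  | case4 c rest cur acc hne hb ih =>
    intro hacc hcur l hl
    rw [PySem.Chars.splitlines.go] at hl
    · rw [if_pos hb] at hl
      refine ih ?_ (by simp) l hl
      intro m hm
      rcases List.mem_cons.mp hm with h | h
      · subst h; simpa using hcur
      · exact hacc m h
    · exact hne
  | case5 c rest cur acc hne hb ih =>
    intro hacc hcur l hl
    rw [PySem.Chars.splitlines.go] at hl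
    · rw [if_neg hb] at hl
      refine ih hacc ?_ l hl
      intro hmem
      rcases List.mem_cons.mp hmem with h | h
      · exact hb (by rw [← h]; exact h10)
      · exact hcur h
    · exact hne

theorem pvSplitlines_no_nl (s : List Char) :
    ∀ l ∈ PySem.Chars.splitlines s, '\n' ∉ l := by
  intro l hl
  exact pvGo_no_nl _ (by decide) s [] [] (by simp) (by simp) l hl

theorem pvDecomp (L : List (List Char)) (i : Nat) (h : i < L.length) :
    pvJ L = pvJ (L.take (i + 1)) ++
        (if L.drop (i + 1) = [] then [] else '\n' :: pvJ (L.drop (i + 1))) ∧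
      (pvJ (L.take (i + 1))).length = pvSumlen L i + L[i].length := by
  have hne : L.take (i + 1) ≠ [] := by
    have hl : (L.take (i + 1)).length = min (i + 1) L.length := List.length_take
    intro e
    rw [e] at hl
    simp at hl
    omega
  constructor
  · conv_lhs => rw [← List.take_append_drop (i + 1) L]
    exact pvJoin_append _ _ hne
  · rw [pvJoin_length _ hne]
    have hlen : (L.take (i + 1)).length = i + 1 := by simp; omega
    have hsum : ((L.take (i + 1)).map List.length).sum =
        ((L.take i).map List.length).sum + L[i].length := by
      rw [List.map_take, List.map_take, List.take_add_one, List.getElem?_map,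
        List.getElem?_eq_getElem h]
      simp
    rw [hsum, hlen]
    unfold pvSumlen
    omega

-- once the flag is true, the rest of A's loop only appends the remaining lines
theorem loopA_true (phil : String) (ls : List String) (acc : List String) :
    ls.foldl (pvStepA phil) (acc, true) = (acc ++ ls, true) := by
  induction ls generalizing acc with
  | nil => simp
  | cons a t ih =>
    rw [List.foldl_cons]
    have h1 : pvStepA phil (acc, true) a = (acc ++ [a], true) := by simp [pvStepA]
    rw [h1, ih]; simp

-- with the flag still false, A's loop inserts the block after the first matching line
theorem loopA_false (phil : String) (ls : List String) (acc : List String) :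
    ls.foldl (pvStepA phil) (acc, false) =
    match ls.findIdx? (fun l => PySem.Str.startswith l "# HCI_V1_SUMMARY") with
      | none => (acc ++ ls, false)
      | some i => (acc ++ (ls.take (i + 1) ++ (["", phil, "", ""] ++ ls.drop (i + 1))), true) := by
  induction ls generalizing acc with
  | nil => simp
  | cons a t ih =>
    rw [List.foldl_cons]
    by_cases h : PySem.Str.startswith a "# HCI_V1_SUMMARY" = true
    all_goals simp only [PySem.Str.startswith_eq,
      show "# HCI_V1_SUMMARY".toList = ['#',' ','H','C','I','_','V','1','_','S','U','M','M','A','R','Y'] from rfl] at h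
    · have h1 : pvStepA phil (acc, false) a = (acc ++ [a] ++ ["", phil, "", ""], true) := by
        simp [pvStepA, h]
      rw [h1, loopA_true]
      simp [List.findIdx?_cons, h]
    · have h1 : pvStepA phil (acc, false) a = (acc ++ [a], false) := by
        simp [pvStepA, h]
      rw [h1, ih]
      simp only [List.findIdx?_cons]
      cases hf : t.findIdx? (fun l => PySem.Str.startswith l "# HCI_V1_SUMMARY") <;>
        simp [h, List.take_succ_cons, List.drop_succ_cons]

-- ===== VERDICT (by name: the statement is the Claim_ definition above) =====
theorem inject_philosophy_line_into_client_spec : Claim_equal_inject_philosophy_line_into_client := by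
  intro text phil _hdom
  unfold Spec_inject_philosophy_line_into_client
  unfold inject_philosophy_line_into_client inject_philosophy_line_into_client_alt
  by_cases hin : PySem.Str.isIn "PHILOSOPHY:" text = true
  · rw [if_pos hin, if_pos hin]
  · simp only [Bool.not_eq_true] at hin
    simp only [hin, Bool.false_eq_true, if_false]
    rw [loopA_false]
    set LS := PySem.Str.splitlines text with hLS
    set L := PySem.Chars.splitlines text.toList with hLdef
    have hmap : LS.map String.toList = L := PySem.Str.splitlines_map_toList text
    have hL : ∀ l ∈ L, '\n' ∉ l := pvSplitlines_no_nl text.toList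
    have hpref1 : ("# HCI_V1_SUMMARY".toList : List Char) ≠ [] := by decide
    have hpref2 : '\n' ∉ ("# HCI_V1_SUMMARY".toList : List Char) := by decide
    have hpredEq : (fun l => PySem.Str.startswith l "# HCI_V1_SUMMARY") =
        (fun l : String => decide ("# HCI_V1_SUMMARY".toList <+: l.toList)) := by
      funext l
      rw [PySem.Str.startswith_eq]
      cases hb : PySem.Chars.startswith l.toList "# HCI_V1_SUMMARY".toList with
      | false =>
        have hnp : ¬ ("# HCI_V1_SUMMARY".toList <+: l.toList) := by
          intro hh
          rw [(PySem.Chars.startswith_iff _ _).mpr hh] at hb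
          cases hb
        simp
        exact hnp
      | true =>
        have hp : ("# HCI_V1_SUMMARY".toList <+: l.toList) :=
          (PySem.Chars.startswith_iff _ _).mp hb
        simp
        exact hp
    have hidx : LS.findIdx? (fun l => PySem.Str.startswith l "# HCI_V1_SUMMARY") =
        L.findIdx? (fun cs => decide ("# HCI_V1_SUMMARY".toList <+: cs)) := by
      rw [hpredEq, ← hmap, List.findIdx?_map]
      rfl
    have hnorm : (PySem.Str.join "\n" LS).toList = pvJ L := by
      rw [PySem.Str.toList_join, hmap]
      rfl
    have hprobe : PySem.Str.find ("\n" ++ PySem.Str.join "\n" LS) "\n# HCI_V1_SUMMARY" =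
        (match L.findIdx? (fun cs => decide ("# HCI_V1_SUMMARY".toList <+: cs)) with
         | none => (-1 : Int)
         | some i => ((pvSumlen L i : Nat) : Int)) := by
      rw [PySem.Str.find_eq, String.toList_append, hnorm]
      exact pvFind_probe _ hpref1 hpref2 L hL
    have hnl1 : ("\n" : String).toList = ['\n'] := rfl
    have hnl2 : ("\n\n" : String).toList = ['\n', '\n'] := rfl
    have hnl3 : ("\n\n\n" : String).toList = ['\n', '\n', '\n'] := rfl
    have hemp : ("" : String).toList = [] := rfl
    have hjA : ∀ out : List String,
        (PySem.Str.join "\n" out).toList = pvJ (out.map String.toList) := fun out => by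
      rw [PySem.Str.toList_join]; rfl
    cases hfi : L.findIdx? (fun cs => decide ("# HCI_V1_SUMMARY".toList <+: cs)) with
    | none =>
      simp only [hfi] at hprobe
      rw [hidx, hfi]
      simp only [hprobe, Bool.not_false, if_true, List.nil_append]
      rw [if_pos (show (-1 : Int) < 0 by norm_num)]
      refine congrArg (fun s : String => s ++ "\n") ?_
      refine String.toList_inj.mp ?_
      rw [PySem.Str.toList_rstrip, PySem.Str.toList_rstrip, hjA, String.toList_append,
        String.toList_append, hnl3, hnorm]
      simp only [List.map_cons, hemp, hmap]
      by_cases hL0 : L = []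
      · rw [hL0]
        have e1 : pvJ [phil.toList, [], []] = phil.toList ++ ['\n', '\n'] := by
          simp [pvJ, PySem.Chars.join, List.intercalate, List.intersperse]
        have e0 : pvJ ([] : List (List Char)) = [] := rfl
        rw [e1, e0, List.append_nil]
        rw [show phil.toList ++ ['\n', '\n'] = (phil.toList ++ ['\n']) ++ ['\n'] by simp,
          pvRstrip_nl, pvRstrip_nl]
        rw [show phil.toList ++ ['\n', '\n', '\n'] =
            ((phil.toList ++ ['\n']) ++ ['\n']) ++ ['\n'] by simp,
          pvRstrip_nl, pvRstrip_nl, pvRstrip_nl]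
      · refine congrArg _ ?_
        rw [pvJoin_cons, if_neg (by simp), pvJoin_cons, if_neg (by simp [hL0]),
          pvJoin_cons, if_neg hL0]
        simp
    | some i =>
      obtain ⟨hi, hp0, hmin0⟩ := List.findIdx?_eq_some_iff_getElem.mp hfi
      have hLi : '\n' ∉ L[i] := hL _ (List.getElem_mem hi)
      obtain ⟨hd1, hd2⟩ := pvDecomp L i hi
      have hXne : L.take (i + 1) ≠ [] := by
        have hl : (L.take (i + 1)).length = min (i + 1) L.length := List.length_take
        intro e
        rw [e] at hl
        simp at hl
        omega
      have hklen : pvSumlen L i + L[i].length ≤ (pvJ L).length := by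
        rw [hd1, List.length_append, hd2]
        omega
      simp only [hfi] at hprobe
      rw [hidx, hfi]
      simp only [hprobe, Bool.not_true, Bool.false_eq_true, if_false, List.nil_append]
      rw [if_neg (show ¬ (((pvSumlen L i : Nat) : Int) < 0) by omega)]
      have hdropJ : (pvJ L).drop (pvSumlen L i) =
          L[i] ++ (if L.drop (i + 1) = [] then [] else '\n' :: pvJ (L.drop (i + 1))) := by
        rw [pvDrop_sumlen L i hi, List.drop_eq_getElem_cons hi, pvJoin_cons]
      by_cases hR : L.drop (i + 1) = []
      · have hXeq : pvJ L = pvJ (L.take (i + 1)) := by rw [hd1, if_pos hR, List.append_nil]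
        have hfind : PySem.Chars.find ((pvJ L).drop (pvSumlen L i)) ['\n'] = -1 := by
          rw [hdropJ, if_pos hR, List.append_nil]
          exact pvFind_nl_none _ hLi
        have hFF : PySem.Str.findFrom (PySem.Str.join "\n" LS) "\n"
            ((pvSumlen L i : Nat) : Int) none = -1 := by
          rw [PySem.Str.findFrom_eq, hnl1, hnorm,
            PySem.Chars.findFrom_natCast _ _ _ (show pvSumlen L i ≤ (pvJ L).length by omega),
            hfind]
          simp
        rw [hFF, if_pos (show (-1 : Int) < 0 by norm_num)]
        have hlen2 : PySem.Str.len (PySem.Str.join "\n" LS) = (((pvJ L).length : Nat) : Int) := by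
          rw [PySem.Str.len_eq, hnorm]
        rw [hlen2]
        refine congrArg (fun s : String => s ++ "\n") ?_
        refine String.toList_inj.mp ?_
        rw [PySem.Str.toList_rstrip, PySem.Str.toList_rstrip, hjA]
        simp only [String.toList_append, PySem.Str.toList_slice, PySem.Chars.slice_eq_listSlice,
          hnorm, PySem.List.slice_to_natCast, PySem.List.slice_from_natCast, List.take_length,
          List.drop_length, hnl2, List.map_append, List.map_take, List.map_drop, List.map_cons,
          List.map_nil, hemp, hmap, List.nil_append, List.append_nil]
        refine congrArg _ ?_
        rw [hR, List.append_nil]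
        rw [pvJoin_append _ _ hXne, if_neg (by simp)]
        have em : pvJ [[], phil.toList, [], []] = '\n' :: (phil.toList ++ ['\n', '\n']) := by
          simp [pvJ, PySem.Chars.join, List.intercalate, List.intersperse]
        rw [em, hXeq]
        simp
      · have hfind : PySem.Chars.find ((pvJ L).drop (pvSumlen L i)) ['\n'] =
            (L[i].length : Int) := by
          rw [hdropJ, if_neg hR]
          exact pvFind_nl_append _ _ hLi
        have hFF : PySem.Str.findFrom (PySem.Str.join "\n" LS) "\n"
            ((pvSumlen L i : Nat) : Int) none =
            ((pvSumlen L i + L[i].length : Nat) : Int) := by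
          rw [PySem.Str.findFrom_eq, hnl1, hnorm,
            PySem.Chars.findFrom_natCast _ _ _ (show pvSumlen L i ≤ (pvJ L).length by omega),
            hfind]
          rw [if_neg (by omega)]
          push_cast
          ring
        rw [hFF, if_neg (show ¬ (((pvSumlen L i + L[i].length : Nat) : Int) < 0) by omega)]
        refine congrArg (fun s : String => s ++ "\n") ?_
        refine String.toList_inj.mp ?_
        rw [PySem.Str.toList_rstrip, PySem.Str.toList_rstrip, hjA]
        simp only [String.toList_append, PySem.Str.toList_slice, PySem.Chars.slice_eq_listSlice,
          hnorm, PySem.List.slice_to_natCast, PySem.List.slice_from_natCast,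
          hnl2, List.map_append, List.map_take, List.map_drop, List.map_cons,
          List.map_nil, hemp, hmap, List.nil_append, List.append_nil]
        refine congrArg _ ?_
        have htake : (pvJ L).take (pvSumlen L i + L[i].length) = pvJ (L.take (i + 1)) := by
          rw [hd1, if_neg hR, ← hd2, List.take_left]
        have hdropE : (pvJ L).drop (pvSumlen L i + L[i].length) = '\n' :: pvJ (L.drop (i + 1)) := by
          rw [hd1, if_neg hR, ← hd2, List.drop_left]
        rw [htake, hdropE]
        rw [pvJoin_append _ _ hXne, if_neg (by simp),
          pvJoin_append _ _ (show ([[], phil.toList, [], []] : List (List Char)) ≠ [] by simp),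
          if_neg hR]
        have em : pvJ [[], phil.toList, [], []] = '\n' :: (phil.toList ++ ['\n', '\n']) := by
          simp [pvJ, PySem.Chars.join, List.intercalate, List.intersperse]
        rw [em]
        simp
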